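-- pv_equiv track=rewrite | github.com/qiniu/pandora-python-sdk.v2 | pdr_python_sdk/pdr_python_sdk/custom_lh_test.py | convert_body_to_str
-- ===== SOURCE A (Python) =====
-- def encode_string(value):
--     """
--     Encode special character, \t \n
--     """
--     value = str.replace(value, '\t', '\\t')
--     value = str.replace(value, '\n', '\\n')
--     return value
--
-- def convert_body_to_str(lines=[]):
--     """
--     Encode lines data to string
--     """
--     if lines is None:
--         return ''
--
--     if len(lines) == 0:
--         return ''
--
--     field_str = ""
--     line_strs = []
--     fields = []
--     allfields = {}
--     for line in lines:
--         if not isinstance(line, dict):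
--             continue
--         row = dict(line)
--         line_str = ''
--         if len(fields) != 0:
--             for field in fields:
--                 if field not in row:
--                     line_str += '\t'
--                 else:
--                     line_str = line_str + encode_string(str(row[field])) + '\t'
--
--         for key in row:
--             if key in allfields:
--                 continue
--             allfields[key] = 0
--             fields.append(key)
--             line_str = line_str + encode_string(str(row[key])) + '\t'
--
--         line_strs.append(line_str[:len(line_str) - 1])
--
--     for field in fields:
--         field_str = field_str + field + '\t'
--
--     field_str = field_str[:len(field_str) - 1]
--
--     body = field_str
--     for line_str in line_strs:
--         body += '\n' + line_str
--
--     return body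
-- ===== SOURCE B (Python) =====
-- def encode_string(value):
--     """
--     Encode special character, \t \n
--     """
--     value = str.replace(value, '\t', '\\t')
--     value = str.replace(value, '\n', '\\n')
--     return value
--
--
-- def convert_body_to_str(lines=[]):
--     """
--     Encode lines data to string: a header naming every column in first-seen
--     order, then one line per row listing the columns known up to that row.
--     """
--     if not lines:
--         return ''
--     rows = [dict(line) for line in lines if isinstance(line, dict)]
--
--     # pass 1: discover columns; remember how many were known after each row
--     fields, seen, widths = [], set(), []
--     for row in rows:
--         for key in row:
--             if key not in seen:
--                 seen.add(key)
--                 fields.append(key)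
--         widths.append(len(fields))
--
--     # pass 2: emit header and rows
--     def cell(row, f):
--         return encode_string(str(row[f])) if f in row else ''
--
--     body = ['\t'.join(fields)]
--     body += ['\t'.join(cell(row, f) for f in fields[:w])
--              for row, w in zip(rows, widths)]
--     return '\n'.join(body)
-- ===== Notes on version B (the rewrite author's own statement) =====
-- stated objective: alternative
-- what changed: A discovers columns and builds each row's string in one interleaved pass via string concatenation with a trailing-tab-then-strip idiom and an allfields seen-dict; B separates the work into a discovery pass (fields in first-seen order plus the column count known after each row) and an emission pass of plain '\t'.join/'\n'.join calls.
import Mathlib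
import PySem

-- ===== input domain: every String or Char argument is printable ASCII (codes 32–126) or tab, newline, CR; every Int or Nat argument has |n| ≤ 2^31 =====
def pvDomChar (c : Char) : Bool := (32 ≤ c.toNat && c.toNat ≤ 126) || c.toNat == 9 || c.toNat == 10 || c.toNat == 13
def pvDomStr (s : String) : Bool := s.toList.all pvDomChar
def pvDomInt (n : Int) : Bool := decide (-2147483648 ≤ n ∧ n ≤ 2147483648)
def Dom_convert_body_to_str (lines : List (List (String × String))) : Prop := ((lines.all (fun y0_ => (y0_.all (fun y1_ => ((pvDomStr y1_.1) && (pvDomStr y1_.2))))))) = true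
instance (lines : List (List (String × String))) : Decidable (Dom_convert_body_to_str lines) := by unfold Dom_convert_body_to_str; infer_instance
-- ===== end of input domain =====

-- B replaces A's single interleaved discover-and-emit pass (string concatenation with a
-- trailing-tab-then-strip idiom) by two passes: a discovery pass recording the column
-- count known after each row, then an emission pass of plain joins; same return value.

-- ===== PORT A =====
-- encode_string(value): value.replace('\t','\\t').replace('\n','\\n')  (shared module helper)
def pvEncodeString (v : List Char) : List Char :=
  PySem.Chars.replace (PySem.Chars.replace v ['\t'] ['\\', 't']) ['\n'] ['\\', 'n']

-- the inner "for key in row" loop; state = (fields, allfields, line_str)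
def pvKeyLoop (row : PySem.Dict String String) (ks : List String)
    (st : List String × PySem.Dict String Nat × List Char) :
    List String × PySem.Dict String Nat × List Char :=
  ks.foldl (fun st k =>
    if st.2.1.contains k then st
    else (st.1 ++ [k], st.2.1.insert k 0,
          st.2.2 ++ pvEncodeString (row.getD k "").toList ++ ['\t'])) st

-- one iteration of "for line in lines"; state = (fields, allfields, line_strs)
def pvLineStep (st : List String × PySem.Dict String Nat × List (List Char))
    (line : List (String × String)) :
    List String × PySem.Dict String Nat × List (List Char) :=
  let row : PySem.Dict String String := PySem.Dict.ofList line
  let ls1 : List Char :=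
    if st.1.length ≠ 0 then
      st.1.foldl (fun acc f =>
        if row.contains f = false then acc ++ ['\t']
        else acc ++ pvEncodeString (row.getD f "").toList ++ ['\t']) []
    else []
  let r := pvKeyLoop row row.keys (st.1, st.2.1, ls1)
  (r.1, r.2.1,
   st.2.2 ++ [PySem.List.slice r.2.2 none (some ((r.2.2.length : Int) - 1))])

def convert_body_to_str (lines : List (List (String × String))) : String :=
  if lines.length = 0 then "" else
  let st := lines.foldl pvLineStep ([], PySem.Dict.empty, [])
  let fieldStr0 : List Char := st.1.foldl (fun acc f => acc ++ f.toList ++ ['\t']) []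
  let fieldStr := PySem.List.slice fieldStr0 none (some ((fieldStr0.length : Int) - 1))
  let body := st.2.2.foldl (fun b l => b ++ '\n' :: l) fieldStr
  String.ofList body

-- ===== PORT B =====
-- encode_string(str(row[f])) if f in row else ''
def pvCell (row : PySem.Dict String String) (f : String) : List Char :=
  if row.contains f then pvEncodeString (row.getD f "").toList else []

def convert_body_to_str_alt (lines : List (List (String × String))) : String :=
  if lines = [] then "" else
  let rows := lines.map (fun l => PySem.Dict.ofList l)
  -- pass 1: fields in first-seen order; widths = number of columns known after each row
  let disc := rows.foldl
      (fun (st : List String × PySem.Set String × List Nat) row =>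
        let fs := row.keys.foldl
          (fun (p : List String × PySem.Set String) key =>
            if PySem.Set.contains p.2 key then p
            else (p.1 ++ [key], PySem.Set.add p.2 key)) (st.1, st.2.1)
        (fs.1, fs.2, st.2.2 ++ [fs.1.length]))
      ([], PySem.Set.empty, [])
  let fields := disc.1
  -- pass 2: header, then one joined line per (row, width)
  let body := [PySem.Chars.join ['\t'] (fields.map String.toList)]
      ++ (rows.zip disc.2.2).map
        (fun rw => PySem.Chars.join ['\t'] ((fields.take rw.2).map (pvCell rw.1)))
  String.ofList (PySem.Chars.join ['\n'] body)

-- ===== PRECONDITION & SPEC =====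
def Spec_convert_body_to_str (lines : List (List (String × String))) (out : String) : Prop := out = convert_body_to_str_alt lines
instance (lines : List (List (String × String))) (out : String) : Decidable (Spec_convert_body_to_str lines out) := by unfold Spec_convert_body_to_str; infer_instance

-- ===== CLAIM (what is proved, stated in full; the proofs are below) =====
def Claim_equal_convert_body_to_str : Prop := ∀ (lines : List (List (String × String))), Dom_convert_body_to_str lines → Spec_convert_body_to_str lines (convert_body_to_str lines)

-- ===== LEMMAS AND PROOFS =====

-- proof-layer helpers: the growing field list, per-row strings and per-row widths
def pvKeysOf (line : List (String × String)) : List String :=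
  (PySem.Dict.ofList (κ := String) (ν := String) line).keys

def pvFieldsAfter (F : List String) : List (List (String × String)) → List String
  | [] => F
  | l :: ls => pvFieldsAfter (PySem.Set.update F (pvKeysOf l)) ls

def pvRowStr (F : List String) (l : List (String × String)) : List Char :=
  PySem.Chars.join ['\t']
    ((PySem.Set.update F (pvKeysOf l)).map (pvCell (PySem.Dict.ofList l)))

def pvRowsFrom (F : List String) : List (List (String × String)) → List (List Char)
  | [] => []
  | l :: ls => pvRowStr F l :: pvRowsFrom (PySem.Set.update F (pvKeysOf l)) ls

def pvWidths (F : List String) : List (List (String × String)) → List Nat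
  | [] => []
  | l :: ls => (PySem.Set.update F (pvKeysOf l)).length
      :: pvWidths (PySem.Set.update F (pvKeysOf l)) ls

theorem pv_join_cons (sep h : List Char) (tl : List (List Char)) :
    PySem.Chars.join sep (h :: tl) = h ++ tl.flatMap (fun l => sep ++ l) := by
  induction tl generalizing h with
  | nil => simp [PySem.Chars.join_singleton]
  | cons d tl' ih =>
    rw [PySem.Chars.join_cons_cons, ih d]
    simp

theorem pv_dropLast_flatMap (cells : List (List Char)) (t : Char) :
    (cells.flatMap (fun c => c ++ [t])).dropLast = PySem.Chars.join [t] cells := by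
  induction cells with
  | nil => simp [PySem.Chars.join_nil]
  | cons c tl ih =>
    cases tl with
    | nil => simp [PySem.Chars.join_singleton]
    | cons d tl' =>
      rw [List.flatMap_cons]
      have hne : List.flatMap (fun c => c ++ [t]) (d :: tl') ≠ [] := by
        simp [List.flatMap_cons]
      rw [List.dropLast_append_of_ne_nil hne, ih, PySem.Chars.join_cons_cons]

theorem pv_slice_len_sub_one {α : Type} (xs : List α) :
    PySem.List.slice xs none (some ((xs.length : Int) - 1)) = xs.dropLast := by
  cases xs with
  | nil => rfl
  | cons a l =>
    have hb : (0:Int) ≤ ((a :: l).length : Int) - 1 := by simp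
    rw [PySem.List.slice_to _ hb]
    have ht : (((a :: l).length : Int) - 1).toNat = (a :: l).length - 1 := by
      simp only [List.length_cons]; omega
    rw [ht]
    exact List.dropLast_eq_take.symm

theorem pv_fieldsAfter_snoc (pre : List (List (String × String)))
    (r : List (String × String)) : ∀ (F : List String),
    pvFieldsAfter F (pre ++ [r]) = PySem.Set.update (pvFieldsAfter F pre) (pvKeysOf r) := by
  induction pre with
  | nil => intro F; rfl
  | cons p pre ih => intro F; simp only [List.cons_append, pvFieldsAfter, ih]

theorem pv_keyLoop_spec (row : PySem.Dict String String) :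
    ∀ (ks : List String), ks.Nodup →
    ∀ (F : List String) (d : PySem.Dict String Nat) (ls : List Char), d.keys = F →
    ∃ d', pvKeyLoop row ks (F, d, ls) =
      (PySem.Set.update F ks, d',
       ls ++ (ks.filter (fun k => !(decide (k ∈ F)))).flatMap
         (fun k => pvEncodeString (row.getD k "").toList ++ ['\t'])) ∧
      d'.keys = PySem.Set.update F ks := by
  intro ks
  induction ks with
  | nil =>
    intro _ F d ls hd
    exact ⟨d, by simp [pvKeyLoop, PySem.Set.update_nil], by simp [PySem.Set.update_nil, hd]⟩
  | cons k ks' ih =>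
    intro hnd F d ls hd
    have hks' : ks'.Nodup := (List.nodup_cons.mp hnd).2
    have hknot : k ∉ ks' := (List.nodup_cons.mp hnd).1
    by_cases hk : k ∈ F
    · have hc : d.contains k = true := (PySem.Dict.contains_iff_mem_keys d k).mpr (hd ▸ hk)
      have hstep : pvKeyLoop row (k :: ks') (F, d, ls) = pvKeyLoop row ks' (F, d, ls) := by
        simp [pvKeyLoop, hc]
      obtain ⟨d', h1, h2⟩ := ih hks' F d ls hd
      have hupd : PySem.Set.update F (k :: ks') = PySem.Set.update F ks' := by
        rw [PySem.Set.update_cons, PySem.Set.add_of_mem hk]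
      have hfil : List.filter (fun j => !(decide (j ∈ F))) (k :: ks')
          = List.filter (fun j => !(decide (j ∈ F))) ks' := by
        simp [hk]
      exact ⟨d', by rw [hstep, h1, hupd, hfil], by rw [h2, hupd]⟩
    · have hc : d.contains k = false := by
        cases h : d.contains k with
        | false => rfl
        | true => exact absurd (hd ▸ (PySem.Dict.contains_iff_mem_keys d k).mp h) hk
      have hstep : pvKeyLoop row (k :: ks') (F, d, ls) =
          pvKeyLoop row ks' (F ++ [k], d.insert k 0,
            ls ++ pvEncodeString (row.getD k "").toList ++ ['\t']) := by
        simp [pvKeyLoop, hc]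
      have hkeys' : (d.insert k 0).keys = F ++ [k] := by
        rw [PySem.Dict.keys_insert_of_not_contains d 0 hc, hd]
      obtain ⟨d', h1, h2⟩ := ih hks' (F ++ [k]) (d.insert k 0) _ hkeys'
      have hupd : PySem.Set.update (F ++ [k]) ks' = PySem.Set.update F (k :: ks') := by
        rw [PySem.Set.update_cons, PySem.Set.add_of_not_mem hk]
      have hfil : List.filter (fun j => !(decide (j ∈ F ++ [k]))) ks'
          = List.filter (fun j => !(decide (j ∈ F))) ks' := by
        apply List.filter_congr
        intro x hx
        have hxk : x ≠ k := fun hh => hknot (hh ▸ hx)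
        simp [List.mem_append, hxk]
      refine ⟨d', ?_, by rw [h2, hupd]⟩
      rw [hstep, h1, hupd, hfil]
      have hfil2 : List.filter (fun j => !(decide (j ∈ F))) (k :: ks')
          = k :: List.filter (fun j => !(decide (j ∈ F))) ks' := by
        simp [hk]
      rw [hfil2, List.flatMap_cons]
      simp

theorem pv_lineStep_spec (F : List String) (d : PySem.Dict String Nat)
    (L : List (List Char)) (line : List (String × String))
    (hd : d.keys = F) (hnd : F.Nodup) :
    ∃ d', pvLineStep (F, d, L) line =
      (PySem.Set.update F (pvKeysOf line), d', L ++ [pvRowStr F line]) ∧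
      d'.keys = PySem.Set.update F (pvKeysOf line) := by
  have hrowkeys : (PySem.Dict.ofList (κ := String) (ν := String) line).keys.Nodup :=
    PySem.Dict.nodup_keys_ofList (κ := String) (ν := String) line
  obtain ⟨d', h1, h2⟩ := pv_keyLoop_spec (PySem.Dict.ofList line)
    (PySem.Dict.ofList (κ := String) (ν := String) line).keys hrowkeys F d
    (F.flatMap (fun f => pvCell (PySem.Dict.ofList line) f ++ ['\t'])) hd
  have hls1 : (if F.length ≠ 0 then
      F.foldl (fun acc f =>
        if (PySem.Dict.ofList (κ := String) (ν := String) line).contains f = false then acc ++ ['\t']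
        else acc ++ pvEncodeString ((PySem.Dict.ofList line).getD f "").toList ++ ['\t']) []
      else []) = F.flatMap (fun f => pvCell (PySem.Dict.ofList line) f ++ ['\t']) := by
    rcases F with _ | ⟨f0, F'⟩
    · simp
    · rw [if_pos (by simp)]
      rw [PySem.List.foldl_congr_mem _ _
        (fun acc f => acc ++ (pvCell (PySem.Dict.ofList line) f ++ ['\t'])) _ ?_]
      · rw [PySem.List.foldl_append_eq_flatMap]
        simp
      · intro acc x _
        cases hc : (PySem.Dict.ofList (κ := String) (ν := String) line).contains x with
        | false => simp [pvCell, hc]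
        | true => simp [pvCell, hc]
  have hcells : (PySem.Set.update F (pvKeysOf line)).map (pvCell (PySem.Dict.ofList line))
      = F.map (pvCell (PySem.Dict.ofList line))
        ++ ((pvKeysOf line).filter (fun k => !(decide (k ∈ F)))).map
             (fun k => pvEncodeString ((PySem.Dict.ofList (κ := String) (ν := String) line).getD k "").toList) := by
    rw [PySem.Set.update_eq_append_filter,
        PySem.Set.ofList_eq_self_of_nodup (pvKeysOf line) hrowkeys, List.map_append]
    congr 1
    have hf : List.filter (fun y => !(PySem.Set.contains F y)) (pvKeysOf line)
        = List.filter (fun k => !(decide (k ∈ F))) (pvKeysOf line) := by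
      apply List.filter_congr
      intro x _
      simp [PySem.Set.contains_eq_listContains]
    rw [hf]
    apply List.map_congr_left
    intro x hx
    have hxm : x ∈ pvKeysOf line := (List.mem_filter.mp hx).1
    have hxc : (PySem.Dict.ofList (κ := String) (ν := String) line).contains x = true :=
      (PySem.Dict.contains_iff_mem_keys _ x).mpr hxm
    simp [pvCell, hxc]
  have hflat : F.flatMap (fun f => pvCell (PySem.Dict.ofList line) f ++ ['\t'])
      ++ (((PySem.Dict.ofList (κ := String) (ν := String) line).keys).filter
            (fun k => !(decide (k ∈ F)))).flatMap
          (fun k => pvEncodeString ((PySem.Dict.ofList line).getD k "").toList ++ ['\t'])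
      = ((PySem.Set.update F (pvKeysOf line)).map (pvCell (PySem.Dict.ofList line))).flatMap
          (fun c => c ++ ['\t']) := by
    rw [hcells, List.flatMap_append, List.flatMap_map, List.flatMap_map]
    rfl
  have hz : PySem.List.slice
      (F.flatMap (fun f => pvCell (PySem.Dict.ofList line) f ++ ['\t'])
        ++ (((PySem.Dict.ofList (κ := String) (ν := String) line).keys).filter
              (fun k => !(decide (k ∈ F)))).flatMap
            (fun k => pvEncodeString ((PySem.Dict.ofList line).getD k "").toList ++ ['\t']))
      none
      (some (((F.flatMap (fun f => pvCell (PySem.Dict.ofList line) f ++ ['\t'])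
        ++ (((PySem.Dict.ofList (κ := String) (ν := String) line).keys).filter
              (fun k => !(decide (k ∈ F)))).flatMap
            (fun k => pvEncodeString ((PySem.Dict.ofList line).getD k "").toList ++ ['\t'])).length : Int) - 1))
      = pvRowStr F line := by
    rw [hflat, pv_slice_len_sub_one, pv_dropLast_flatMap]
    rfl
  refine ⟨d', ?_, h2⟩
  simp only [pvLineStep]
  rw [hls1, h1, hz]
  rfl

theorem pv_mainLoop_spec :
    ∀ (ls : List (List (String × String))) (F : List String)
      (d : PySem.Dict String Nat) (L : List (List Char)),
      d.keys = F → F.Nodup →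
    ∃ d', ls.foldl pvLineStep (F, d, L) =
      (pvFieldsAfter F ls, d', L ++ pvRowsFrom F ls) ∧
      d'.keys = pvFieldsAfter F ls := by
  intro ls
  induction ls with
  | nil =>
    intro F d L hd _
    exact ⟨d, by simp [pvFieldsAfter, pvRowsFrom], by simp [pvFieldsAfter, hd]⟩
  | cons l ls ih =>
    intro F d L hd hnd
    obtain ⟨d1, h1, h2⟩ := pv_lineStep_spec F d L l hd hnd
    obtain ⟨d', h3, h4⟩ := ih _ d1 (L ++ [pvRowStr F l]) h2 (PySem.Set.nodup_update F _ hnd)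
    refine ⟨d', ?_, h4⟩
    rw [List.foldl_cons, h1, h3]
    simp [pvFieldsAfter, pvRowsFrom]

theorem pv_A_eq (lines : List (List (String × String))) (h : lines ≠ []) :
    convert_body_to_str lines =
      String.ofList (PySem.Chars.join ['\t'] ((pvFieldsAfter [] lines).map String.toList)
        ++ (pvRowsFrom [] lines).flatMap (fun l => '\n' :: l)) := by
  obtain ⟨d', hfold, _⟩ := pv_mainLoop_spec lines [] PySem.Dict.empty []
    (PySem.Dict.keys_empty) List.nodup_nil
  unfold convert_body_to_str
  rw [if_neg (by simpa using h)]
  simp only [hfold, List.nil_append]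
  have hfs : (pvFieldsAfter [] lines).foldl (fun acc f => acc ++ f.toList ++ ['\t']) []
      = ((pvFieldsAfter [] lines).map String.toList).flatMap (fun c => c ++ ['\t']) := by
    rw [PySem.List.foldl_congr_mem _ _ (fun acc f => acc ++ (f.toList ++ ['\t'])) _
      (by intro acc x _; simp)]
    rw [PySem.List.foldl_append_eq_flatMap, List.flatMap_map]
    simp
  rw [hfs, pv_slice_len_sub_one, pv_dropLast_flatMap]
  rw [PySem.List.foldl_append_eq_flatMap (g := fun l => '\n' :: l)]

-- B-side lemmas

theorem pv_keyDisc (ks : List String) : ∀ (F : List String),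
    ks.foldl (fun (p : List String × PySem.Set String) key =>
        if PySem.Set.contains p.2 key then p
        else (p.1 ++ [key], PySem.Set.add p.2 key)) (F, F)
      = (PySem.Set.update F ks, PySem.Set.update F ks) := by
  induction ks with
  | nil => intro F; simp [PySem.Set.update_nil]
  | cons k ks ih =>
    intro F
    rw [List.foldl_cons, PySem.Set.update_cons]
    have hinit : (if PySem.Set.contains (F, F).2 k = true then ((F, F) : List String × PySem.Set String)
        else ((F, F).1 ++ [k], PySem.Set.add (F, F).2 k)) = (PySem.Set.add F k, PySem.Set.add F k) := by
      by_cases hk : k ∈ F <;> simp [PySem.Set.add, hk]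
    rw [hinit]
    exact ih (PySem.Set.add F k)

theorem pv_discLoop : ∀ (ls : List (List (String × String))) (F : List String) (W : List Nat),
    (ls.map (fun l => PySem.Dict.ofList l)).foldl
      (fun (st : List String × PySem.Set String × List Nat) row =>
        let fs := row.keys.foldl
          (fun (p : List String × PySem.Set String) key =>
            if PySem.Set.contains p.2 key then p
            else (p.1 ++ [key], PySem.Set.add p.2 key)) (st.1, st.2.1)
        (fs.1, fs.2, st.2.2 ++ [fs.1.length])) (F, F, W)
    = (pvFieldsAfter F ls, pvFieldsAfter F ls, W ++ pvWidths F ls) := by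
  intro ls
  induction ls with
  | nil => intro F W; simp [pvFieldsAfter, pvWidths]
  | cons l ls ih =>
    intro F W
    rw [List.map_cons, List.foldl_cons]
    simp only [pv_keyDisc (PySem.Dict.ofList (κ := String) (ν := String) l).keys F]
    have := ih (PySem.Set.update F (pvKeysOf l)) (W ++ [(PySem.Set.update F (pvKeysOf l)).length])
    simp only [pvKeysOf] at this ⊢
    rw [this]
    simp [pvFieldsAfter, pvWidths, pvKeysOf]

theorem pv_fieldsAfter_append (xs ys : List (List (String × String))) : ∀ (F : List String),
    pvFieldsAfter F (xs ++ ys) = pvFieldsAfter (pvFieldsAfter F xs) ys := by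
  induction xs with
  | nil => intro F; rfl
  | cons x xs ih => intro F; simp only [List.cons_append, pvFieldsAfter, ih]

theorem pv_fieldsAfter_prefix (ls : List (List (String × String))) : ∀ (F : List String),
    ∃ t, pvFieldsAfter F ls = F ++ t := by
  induction ls with
  | nil => exact fun F => ⟨[], by simp [pvFieldsAfter]⟩
  | cons l ls ih =>
    intro F
    obtain ⟨t, ht⟩ := ih (PySem.Set.update F (pvKeysOf l))
    refine ⟨List.filter (fun y => !(PySem.Set.contains F y)) (PySem.Set.ofList (pvKeysOf l)) ++ t, ?_⟩
    rw [pvFieldsAfter, ht, PySem.Set.update_eq_append_filter, List.append_assoc]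

theorem pv_take_fieldsAfter (ls : List (List (String × String))) (F : List String) :
    (pvFieldsAfter F ls).take F.length = F := by
  obtain ⟨t, ht⟩ := pv_fieldsAfter_prefix ls F
  rw [ht, List.take_left]

theorem pv_B_emit (lines : List (List (String × String))) :
    ∀ (rs pre : List (List (String × String))), lines = pre ++ rs →
    ((rs.map (fun l => PySem.Dict.ofList l)).zip (pvWidths (pvFieldsAfter [] pre) rs)).map
      (fun rw => PySem.Chars.join ['\t']
        (((pvFieldsAfter [] lines).take rw.2).map (pvCell rw.1)))
    = pvRowsFrom (pvFieldsAfter [] pre) rs := by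
  intro rs
  induction rs with
  | nil => intro pre _; simp [pvRowsFrom, pvWidths]
  | cons r rs ih =>
    intro pre h
    rw [List.map_cons]
    simp only [pvWidths, List.zip_cons_cons, List.map_cons]
    have hsnoc : PySem.Set.update (pvFieldsAfter [] pre) (pvKeysOf r)
        = pvFieldsAfter [] (pre ++ [r]) := (pv_fieldsAfter_snoc pre r []).symm
    have htake : (pvFieldsAfter [] lines).take (pvFieldsAfter [] (pre ++ [r])).length
        = pvFieldsAfter [] (pre ++ [r]) := by
      have e : lines = (pre ++ [r]) ++ rs := by rw [h]; simp
      rw [e, pv_fieldsAfter_append (pre ++ [r]) rs []]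
      exact pv_take_fieldsAfter rs (pvFieldsAfter [] (pre ++ [r]))
    have hhead : PySem.Chars.join ['\t']
        (((pvFieldsAfter [] lines).take (PySem.Set.update (pvFieldsAfter [] pre) (pvKeysOf r)).length).map
          (pvCell (PySem.Dict.ofList r)))
        = pvRowStr (pvFieldsAfter [] pre) r := by
      rw [hsnoc, htake, ← hsnoc, pvRowStr]
    have htail := ih (pre ++ [r]) (by rw [h]; simp)
    rw [pv_fieldsAfter_snoc pre r [] ] at htail
    rw [pvRowsFrom, hhead, htail]

theorem pv_B_eq (lines : List (List (String × String))) (h : lines ≠ []) :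
    convert_body_to_str_alt lines =
      String.ofList (PySem.Chars.join ['\t'] ((pvFieldsAfter [] lines).map String.toList)
        ++ (pvRowsFrom [] lines).flatMap (fun l => '\n' :: l)) := by
  unfold convert_body_to_str_alt
  rw [if_neg h, show (PySem.Set.empty : PySem.Set String) = [] from rfl]
  have hdisc := pv_discLoop lines [] []
  simp only [List.nil_append] at hdisc
  simp only [hdisc]
  have hemit := pv_B_emit lines lines [] rfl
  simp only [pvFieldsAfter] at hemit
  rw [List.singleton_append, pv_join_cons, hemit]
  simp only [List.singleton_append]

-- ===== VERDICT (by name: the statement is the Claim_ definition above) =====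
theorem convert_body_to_str_spec : Claim_equal_convert_body_to_str := by
  unfold Claim_equal_convert_body_to_str
  intro lines _
  unfold Spec_convert_body_to_str
  by_cases h : lines = []
  · subst h; rfl
  · rw [pv_A_eq lines h, pv_B_eq lines h]
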